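-- pv_equiv track=rewrite | github.com/pypi-data/pypi-mirror-255 | packages/dj-migration-automation/dj_migration_automation-0.1.3-py3-none-any.whl/src/service/mfd.py | get_location_data_for_couch_db
-- ===== SOURCE A (Python) =====
-- def get_location_data_for_couch_db(location_number_list, max_location_number):
--     canister_data = dict()
--     for i in range(1, max_location_number+1):
--         canister_data[i] = {
--             "canister_required": i in location_number_list,
--             "current_canister_id": None,
--             "required_canister_id": None,
--             "error_message": None,
--             "is_in_error": False,
--             "transfer_done": False,
--             "message_location": None
--         }
--     return canister_data
-- ===== SOURCE B (Python) =====
-- def get_location_data_for_couch_db(location_number_list, max_location_number):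
--     template = {
--         "canister_required": False,
--         "current_canister_id": None,
--         "required_canister_id": None,
--         "error_message": None,
--         "is_in_error": False,
--         "transfer_done": False,
--         "message_location": None
--     }
--     canister_data = {i: dict(template) for i in range(1, max_location_number + 1)}
--     for loc in location_number_list:
--         if loc in canister_data:
--             canister_data[loc]["canister_required"] = True
--     return canister_data
-- ===== Notes on version B (the rewrite author's own statement) =====
-- stated objective: faster
-- what changed: A tests list membership for every key while building each entry; B builds all entries with canister_required=False in one pass over the range and then marks True in a second pass over location_number_list guarded by dict-key membership.
import Mathlib
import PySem

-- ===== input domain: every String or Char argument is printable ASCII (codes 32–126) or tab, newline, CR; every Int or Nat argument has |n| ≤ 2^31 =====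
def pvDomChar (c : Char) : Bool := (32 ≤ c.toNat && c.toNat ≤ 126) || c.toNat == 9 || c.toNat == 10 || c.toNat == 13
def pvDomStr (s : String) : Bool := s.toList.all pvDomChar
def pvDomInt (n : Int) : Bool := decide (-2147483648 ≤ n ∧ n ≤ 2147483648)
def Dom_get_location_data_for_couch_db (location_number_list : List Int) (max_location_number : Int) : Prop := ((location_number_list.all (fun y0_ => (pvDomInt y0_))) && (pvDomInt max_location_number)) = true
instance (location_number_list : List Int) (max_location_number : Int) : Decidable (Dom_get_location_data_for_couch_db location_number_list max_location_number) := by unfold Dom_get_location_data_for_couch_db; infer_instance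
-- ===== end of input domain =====

-- B builds every entry with canister_required=False in one range pass, then marks True in a
-- second pass over location_number_list (asymptotically faster than A's per-key list scan).

-- ===== PORT A =====
def get_location_data_for_couch_db (location_number_list : List Int) (max_location_number : Int) : List (Int × List (String × Option Bool)) :=
  ((PySem.List.pyRange 1 (max_location_number + 1) 1).foldl
    (fun canister_data i =>
      canister_data.insert i
        [("canister_required", some (decide (i ∈ location_number_list))),
         ("current_canister_id", none),
         ("required_canister_id", none),
         ("error_message", none),
         ("is_in_error", some false),
         ("transfer_done", some false),
         ("message_location", none)])
    (PySem.Dict.empty : PySem.Dict Int (List (String × Option Bool)))).items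

-- ===== PORT B =====
def get_location_data_for_couch_db_alt (location_number_list : List Int) (max_location_number : Int) : List (Int × List (String × Option Bool)) :=
  let template : List (String × Option Bool) :=
    [("canister_required", some false),
     ("current_canister_id", none),
     ("required_canister_id", none),
     ("error_message", none),
     ("is_in_error", some false),
     ("transfer_done", some false),
     ("message_location", none)]
  let canister_data : PySem.Dict Int (List (String × Option Bool)) :=
    PySem.Dict.ofList ((PySem.List.pyRange 1 (max_location_number + 1) 1).map (fun i => (i, template)))
  let canister_data :=
    location_number_list.foldl
      (fun canister_data loc =>
        if canister_data.contains loc then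
          canister_data.modify loc []
            (fun inner => ((PySem.Dict.mk inner).insert "canister_required" (some true)).items)
        else canister_data)
      canister_data
  canister_data.items

-- ===== PRECONDITION & SPEC =====
def Spec_get_location_data_for_couch_db (location_number_list : List Int) (max_location_number : Int) (out : List (Int × List (String × Option Bool))) : Prop := out = get_location_data_for_couch_db_alt location_number_list max_location_number
instance (location_number_list : List Int) (max_location_number : Int) (out : List (Int × List (String × Option Bool))) : Decidable (Spec_get_location_data_for_couch_db location_number_list max_location_number out) := by unfold Spec_get_location_data_for_couch_db; infer_instance

-- ===== CLAIM (what is proved, stated in full; the proofs are below) =====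
def Claim_equal_get_location_data_for_couch_db : Prop := ∀ (location_number_list : List Int) (max_location_number : Int), Dom_get_location_data_for_couch_db location_number_list max_location_number → Spec_get_location_data_for_couch_db location_number_list max_location_number (get_location_data_for_couch_db location_number_list max_location_number)

-- ===== LEMMAS AND PROOFS =====

-- the canister entry with a given canister_required flag
def pvEnt (b : Bool) : List (String × Option Bool) :=
  [("canister_required", some b),
   ("current_canister_id", none),
   ("required_canister_id", none),
   ("error_message", none),
   ("is_in_error", some false),
   ("transfer_done", some false),
   ("message_location", none)]

theorem pvEnt_mark (b : Bool) :
    ((PySem.Dict.mk (pvEnt b)).insert "canister_required" (some true)).items = pvEnt true := by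
  cases b <;> decide

theorem portA_items (lst : List Int) (m : Int) :
    get_location_data_for_couch_db lst m
      = (PySem.List.pyRange 1 (m + 1) 1).map (fun i => (i, pvEnt (decide (i ∈ lst)))) := by
  unfold get_location_data_for_couch_db
  have := PySem.Dict.items_foldl_insert_fresh
    (l := PySem.List.pyRange 1 (m + 1) 1) (k := fun i => i)
    (v := fun i => pvEnt (decide (i ∈ lst)))
    (d := (PySem.Dict.empty : PySem.Dict Int (List (String × Option Bool))))
    (by intro a _; rfl)
    (by simpa using PySem.List.nodup_pyRange_one 1 (m + 1))
  simpa [pvEnt] using this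

theorem portB_first_items (m : Int) (ent : List (String × Option Bool)) :
    (PySem.Dict.ofList ((PySem.List.pyRange 1 (m + 1) 1).map (fun i => (i, ent))))
      = PySem.Dict.mk ((PySem.List.pyRange 1 (m + 1) 1).map (fun i => (i, ent))) := by
  apply PySem.Dict.ext
  have := PySem.Dict.items_foldl_insert_fresh
    (l := (PySem.List.pyRange 1 (m + 1) 1).map (fun i => (i, ent)))
    (k := (·.1)) (v := (·.2))
    (d := (PySem.Dict.empty : PySem.Dict Int (List (String × Option Bool))))
    (by intro a _; rfl)
    (by simpa [Function.comp_def] using PySem.List.nodup_pyRange_one 1 (m + 1))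
  simpa [PySem.Dict.ofList] using this

-- the marking pass over a dict whose items are (i, pvEnt (f i)) for i in R
theorem mark_pass (R : List Int) (hR : R.Nodup) (lst : List Int) (f : Int → Bool) :
    (lst.foldl
      (fun (d : PySem.Dict Int (List (String × Option Bool))) loc =>
        if d.contains loc then
          d.modify loc []
            (fun inner => ((PySem.Dict.mk inner).insert "canister_required" (some true)).items)
        else d)
      (PySem.Dict.mk (R.map (fun i => (i, pvEnt (f i)))))).items
      = R.map (fun i => (i, pvEnt (f i || decide (i ∈ lst)))) := by
  induction lst generalizing f with
  | nil => simp
  | cons loc rest ih =>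
    have hkeys : (PySem.Dict.mk (R.map (fun i => (i, pvEnt (f i))))).keys = R := by
      simp [PySem.Dict.keys, Function.comp_def]
    have hcont : (PySem.Dict.mk (R.map (fun i => (i, pvEnt (f i))))).contains loc
        = decide (loc ∈ R) := by
      rw [PySem.Dict.contains_eq_decide_mem_keys, hkeys]
    simp only [List.foldl_cons]
    by_cases h : loc ∈ R
    · rw [hcont]
      simp only [h, decide_true, if_true]
      have hgetD : (PySem.Dict.mk (R.map (fun i => (i, pvEnt (f i))))).getD loc [] = pvEnt (f loc) := by
        apply PySem.Dict.getD_of_mem_items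
        · exact List.mem_map_of_mem h
        · rw [hkeys]; exact hR
      have hmod : (PySem.Dict.mk (R.map (fun i => (i, pvEnt (f i))))).modify loc []
            (fun inner => ((PySem.Dict.mk inner).insert "canister_required" (some true)).items)
          = PySem.Dict.mk (R.map (fun i => (i, pvEnt (if i = loc then true else f i)))) := by
        apply PySem.Dict.ext
        rw [PySem.Dict.modify, hgetD, PySem.Dict.items_insert_of_contains _ _ (by rw [hcont]; simpa)]
        show (R.map (fun i => (i, pvEnt (f i)))).map _ = _
        rw [List.map_map]
        apply List.map_congr_left
        intro i _
        by_cases hi : i = loc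
        · subst hi; simp [pvEnt_mark]
        · simp [Function.comp, hi]
      rw [hmod, ih (fun i => if i = loc then true else f i)]
      apply List.map_congr_left
      intro i _
      by_cases hi : i = loc
      · subst hi; simp
      · simp [hi]
    · rw [hcont]
      simp only [h, decide_false, Bool.false_eq_true, if_false]
      rw [ih f]
      apply List.map_congr_left
      intro i hiR
      have hi : i ≠ loc := by rintro rfl; exact h hiR
      simp [hi]

theorem get_location_data_for_couch_db_spec_aux (lst : List Int) (m : Int) :
    get_location_data_for_couch_db lst m = get_location_data_for_couch_db_alt lst m := by
  rw [portA_items]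
  show _ = (lst.foldl
      (fun (canister_data : PySem.Dict Int (List (String × Option Bool))) loc =>
        if canister_data.contains loc then
          canister_data.modify loc []
            (fun inner => ((PySem.Dict.mk inner).insert "canister_required" (some true)).items)
        else canister_data)
      (PySem.Dict.ofList ((PySem.List.pyRange 1 (m + 1) 1).map (fun i => (i, pvEnt false))))).items
  rw [portB_first_items m (pvEnt false)]
  rw [mark_pass _ (PySem.List.nodup_pyRange_one 1 (m + 1)) lst (fun _ => false)]
  simp

-- ===== VERDICT (by name: the statement is the Claim_ definition above) =====
theorem get_location_data_for_couch_db_spec : Claim_equal_get_location_data_for_couch_db := by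
  intro lst m _
  exact get_location_data_for_couch_db_spec_aux lst m
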